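-- pv_equiv track=rewrite | github.com/tomduck/bassclef | bassclef/preprocess.py | insert_figure
-- ===== SOURCE A (Python) =====
-- def insert_figure(lines, image, caption):
--     """Inserts a figure into the markdown lines."""
--
--     # Look for the image line
--     n = None
--     flag = False  # Flag when we have found it
--     for i, line in enumerate(lines):
--         if flag:
--             n = i
--             break
--         if line == '<!-- image -->':
--             n = i
--             continue
--
--     # Find the end of the first paragraph
--     if n is None:
--         flag = False  # Flag when we have found it
--         for i, line in enumerate(lines):
--             if flag:
--                 n = i
--                 break
--             if line:
--                 flag = True
--                 continue
--
--     # Insert the lines for the figure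
--     n = n if n is not None else len(lines)
--     lines.insert(n, '\n![%s](%s)\n' % (caption, image))
--     lines.insert(n, '')
--
--     return lines
-- ===== SOURCE B (Python) =====
-- def insert_figure(lines, image, caption):
--     """Inserts a figure into the markdown lines (mutates and returns lines).
--
--     Single reverse pass building the result back-to-front: the figure is
--     emitted right after the first marker seen in reverse (= last marker
--     forward); otherwise it is spliced just before the last non-empty line
--     seen in reverse (= after the first non-empty line forward), defaulting
--     to the very end (start of the reversed buffer)."""
--     fig = '\n![%s](%s)\n' % (caption, image)
--     out = []
--     done = False
--     pos = 0
--     for line in reversed(lines):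
--         out.append(line)
--         if not done:
--             if line == '<!-- image -->':
--                 out.append(fig)
--                 out.append('')
--                 done = True
--             elif line:
--                 pos = len(out) - 1
--     if not done:
--         out[pos:pos] = [fig, '']
--     out.reverse()
--     lines[:] = out
--     return lines
-- ===== Notes on version B (the rewrite author's own statement) =====
-- stated objective: alternative
-- what changed: Replaces A's two forward flag-driven index-finding loops plus two list.insert calls by a single backward pass that builds the output back-to-front, emitting the figure immediately after the first marker seen in reverse and otherwise splicing it before the last non-empty line seen (deferred splice), then reversing once.
import Mathlib
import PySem

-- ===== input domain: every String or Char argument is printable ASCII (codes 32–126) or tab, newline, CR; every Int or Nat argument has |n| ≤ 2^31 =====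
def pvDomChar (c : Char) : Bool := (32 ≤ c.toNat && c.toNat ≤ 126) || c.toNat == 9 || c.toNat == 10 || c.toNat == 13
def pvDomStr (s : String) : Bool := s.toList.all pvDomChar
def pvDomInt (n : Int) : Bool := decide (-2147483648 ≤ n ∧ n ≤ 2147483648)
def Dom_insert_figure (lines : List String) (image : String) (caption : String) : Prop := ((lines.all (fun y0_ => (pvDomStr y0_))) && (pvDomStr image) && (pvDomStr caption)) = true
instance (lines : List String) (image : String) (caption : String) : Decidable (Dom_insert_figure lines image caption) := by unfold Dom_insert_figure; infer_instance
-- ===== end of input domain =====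

-- B replaces A's two forward flag-driven index-finding loops plus two inserts by a single
-- backward pass that builds the output back-to-front with a deferred splice — objective:
-- an alternative decomposition of the same O(n) task.
-- A mutates `lines` in place (B does too, via lines[:] = …); the equivalence proved here
-- is about the RETURN value.

-- ===== PORT A =====
-- first loop of A: state is (n, flag); flag is never set by this loop's body
def pvAFindImage : List (Int × String) → Option Int → Bool → Option Int
  | [], n, _ => n
  | (i, line) :: rest, n, flag =>
    if flag then some i                              -- `if flag: n = i; break`
    else if line == "<!-- image -->" then
      pvAFindImage rest (some i) flag                -- `n = i; continue`
    else pvAFindImage rest n flag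

-- second loop of A: flag is set at the first truthy (non-empty) line
def pvAFindPara : List (Int × String) → Option Int → Bool → Option Int
  | [], n, _ => n
  | (i, line) :: rest, n, flag =>
    if flag then some i                              -- `if flag: n = i; break`
    else if line ≠ "" then
      pvAFindPara rest n true                        -- `flag = True; continue`
    else pvAFindPara rest n flag

def insert_figure (lines : List String) (image : String) (caption : String) : List String :=
  let n0 := pvAFindImage (PySem.List.enumerate lines) none false
  let n1 := match n0 with
    | none => pvAFindPara (PySem.List.enumerate lines) none false
    | some v => some v
  let n : Int := n1.getD (lines.length : Int)        -- `n = n if n is not None else len(lines)`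
  let fig := "\n![" ++ caption ++ "](" ++ image ++ ")\n"
  PySem.List.insert (PySem.List.insert lines n fig) n ""

-- ===== PORT B =====
-- the single `for line in reversed(lines)` loop of Source B; state is (out, done, pos)
def pvBLoop (fig : String) : List String → List String → Bool → Nat → (List String × Bool × Nat)
  | [], out, done, pos => (out, done, pos)
  | line :: rest, out, done, pos =>
    let out := out ++ [line]                         -- `out.append(line)`
    if done then pvBLoop fig rest out done pos
    else if line = "<!-- image -->" then
      pvBLoop fig rest (out ++ [fig, ""]) true pos   -- `out.append(fig); out.append(''); done = True`
    else if line ≠ "" then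
      pvBLoop fig rest out false (out.length - 1)    -- `pos = len(out) - 1`
    else pvBLoop fig rest out false pos

def insert_figure_alt (lines : List String) (image : String) (caption : String) : List String :=
  let fig := "\n![" ++ caption ++ "](" ++ image ++ ")\n"
  let s := pvBLoop fig lines.reverse [] false 0
  let out := s.1
  -- `if not done: out[pos:pos] = [fig, '']`  (exact: 0 ≤ pos ≤ len(out) always holds here)
  let out := if s.2.1 then out else out.take s.2.2 ++ [fig, ""] ++ out.drop s.2.2
  out.reverse                                        -- `out.reverse(); lines[:] = out; return lines`

-- ===== PRECONDITION & SPEC =====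
def Spec_insert_figure (lines : List String) (image : String) (caption : String) (out : List String) : Prop := out = insert_figure_alt lines image caption
instance (lines : List String) (image : String) (caption : String) (out : List String) : Decidable (Spec_insert_figure lines image caption out) := by unfold Spec_insert_figure; infer_instance

-- ===== CLAIM (what is proved, stated in full; the proofs are below) =====
def Claim_equal_insert_figure : Prop := ∀ (lines : List String) (image : String) (caption : String), Dom_insert_figure lines image caption → Spec_insert_figure lines image caption (insert_figure lines image caption)

-- ===== LEMMAS AND PROOFS =====

-- index of the LAST occurrence of the marker, as a back-to-front recursion
def pvLastIdx : List String → Option Nat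
  | [] => none
  | x :: rest =>
    match pvLastIdx rest with
    | some k => some (k + 1)
    | none => if x = "<!-- image -->" then some 0 else none

-- index of the FIRST occurrence of the marker
def pvFirstM : List String → Option Nat
  | [] => none
  | x :: rest => if x = "<!-- image -->" then some 0 else (pvFirstM rest).map (· + 1)

-- index of the LAST non-empty line
def pvLastNE : List String → Option Nat
  | [] => none
  | x :: rest =>
    match pvLastNE rest with
    | some k => some (k + 1)
    | none => if x ≠ "" then some 0 else none

-- final `pos` of the B loop: last non-empty index of the scanned prefix, shifted by the
-- length of the buffer at entry; pos0 if the prefix is all-empty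
def pvPos (base : Nat) (pos0 : Nat) (p : List String) : Nat :=
  match pvLastNE p with
  | some k => base + k
  | none => pos0

theorem pvLastIdx_lt (l : List String) (k : Nat) (h : pvLastIdx l = some k) :
    k < l.length := by
  induction l generalizing k with
  | nil => simp [pvLastIdx] at h
  | cons x rest ih =>
    simp only [pvLastIdx] at h
    simp only [List.length_cons]
    cases h' : pvLastIdx rest with
    | some m =>
      rw [h'] at h
      simp only [Option.some.injEq] at h
      have := ih m h'
      omega
    | none =>
      rw [h'] at h
      by_cases hx : x = "<!-- image -->"
      · simp [hx] at h; omega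
      · simp [hx] at h

-- both inserts at a common position 0 ≤ n ≤ len collapse to one take/drop splice
theorem pvInsert2 (l : List String) (n : Nat) (h : n ≤ l.length) (a b : String) :
    PySem.List.insert (PySem.List.insert l (n : Int) a) (n : Int) b =
      l.take n ++ [b, a] ++ l.drop n := by
  have h1 : (l.take n).length = n := by simp [List.length_take]; omega
  rw [PySem.List.insert_natCast l n a h,
      PySem.List.insert_natCast _ n b (by simp; omega),
      List.take_left' h1, List.drop_left' h1]
  simp

theorem pvAFindImage_spec (l : List String) (s : Int) (acc : Option Int) :
    pvAFindImage (PySem.List.enumerate l s) acc false =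
      match pvLastIdx l with
      | some k => some (s + k)
      | none => acc := by
  induction l generalizing s acc with
  | nil => simp [PySem.List.enumerate_nil, pvAFindImage, pvLastIdx]
  | cons x rest ih =>
    rw [PySem.List.enumerate_cons]
    simp only [pvAFindImage, if_neg (by simp : ¬ (false = true)), pvLastIdx]
    cases h : pvLastIdx rest with
    | some k =>
      have hk := ih (s + 1)
      by_cases hx : x = "<!-- image -->" <;>
        simp [hx, hk, h] <;> ring_nf
    | none =>
      have hk := ih (s + 1)
      by_cases hx : x = "<!-- image -->" <;> simp [hx, hk, h]

theorem pvAFindPara_true (l : List String) (s : Int) (acc : Option Int) :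
    pvAFindPara (PySem.List.enumerate l s) acc true =
      match l with
      | [] => acc
      | _ :: _ => some s := by
  cases l with
  | nil => simp [PySem.List.enumerate_nil, pvAFindPara]
  | cons x rest => rw [PySem.List.enumerate_cons]; simp [pvAFindPara]

theorem pvAFindPara_spec (l : List String) (s : Int) :
    pvAFindPara (PySem.List.enumerate l s) none false =
      match l.findIdx? (fun line => line ≠ "") with
      | some i => if i + 1 < l.length then some (s + i + 1) else none
      | none => none := by
  induction l generalizing s with
  | nil => simp [PySem.List.enumerate_nil, pvAFindPara]
  | cons x rest ih =>
    rw [PySem.List.enumerate_cons]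
    simp only [pvAFindPara, if_neg (by simp : ¬ (false = true))]
    by_cases hx : x = ""
    · -- empty line: flag stays false, the generator skips x
      rw [if_neg (by simp [hx])]
      rw [ih (s + 1), List.findIdx?_cons]
      rw [if_neg (by simp [hx])]
      cases h : rest.findIdx? (fun line => line ≠ "") with
      | none => simp
      | some i =>
        simp only [Option.map_some, List.length_cons]
        by_cases hi : i + 1 < rest.length
        · rw [if_pos hi, if_pos (by omega)]
          congr 1
          push_cast
          ring
        · rw [if_neg hi, if_neg (by omega)]
    · -- non-empty line: the flag is set; the generator yields index 0
      rw [if_pos (by simp [hx])]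
      rw [pvAFindPara_true, List.findIdx?_cons, if_pos (by simp [hx])]
      cases rest with
      | nil => simp
      | cons y t =>
        simp only [List.length_cons]
        rw [if_pos (by omega)]
        congr 1
        push_cast
        ring

-- once done, the loop only copies the remaining lines
theorem pvBLoop_done (fig : String) (r out : List String) (pos : Nat) :
    pvBLoop fig r out true pos = (out ++ r, true, pos) := by
  induction r generalizing out with
  | nil => simp [pvBLoop]
  | cons x rest ih => simp [pvBLoop, ih]

-- shifting the buffer base across one scanned line
theorem pvPos_cons_ne (x : String) (hx : x ≠ "") (b pos0 : Nat) (p : List String) :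
    pvPos (b + 1) b p = pvPos b pos0 (x :: p) := by
  simp only [pvPos, pvLastNE]
  cases h : pvLastNE p with
  | some k => simp; omega
  | none => simp [hx]

theorem pvPos_cons_empty (b pos0 : Nat) (p : List String) :
    pvPos (b + 1) pos0 p = pvPos b pos0 ("" :: p) := by
  simp only [pvPos, pvLastNE]
  cases h : pvLastNE p with
  | some k => simp; omega
  | none => simp

-- full characterisation of the B loop started with done = false
theorem pvBLoop_spec (fig : String) (r out0 : List String) (pos0 : Nat) :
    pvBLoop fig r out0 false pos0 =
      match pvFirstM r with
      | some j => (out0 ++ r.take (j + 1) ++ [fig, ""] ++ r.drop (j + 1), true,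
                   pvPos out0.length pos0 (r.take j))
      | none => (out0 ++ r, false, pvPos out0.length pos0 r) := by
  induction r generalizing out0 pos0 with
  | nil => simp [pvBLoop, pvFirstM, pvPos, pvLastNE]
  | cons x rest ih =>
    simp only [pvBLoop, if_neg (by simp : ¬ (false = true))]
    by_cases hx : x = "<!-- image -->"
    · rw [if_pos hx, pvBLoop_done]
      simp [pvFirstM, hx, pvPos, pvLastNE]
    · rw [if_neg hx]
      have hb : (out0 ++ [x]).length = out0.length + 1 := by simp
      by_cases hne : x ≠ ""
      · rw [if_pos hne]
        have hlen : (out0 ++ [x]).length - 1 = out0.length := by simp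
        rw [hlen, ih]
        simp only [pvFirstM, if_neg hx]
        cases h : pvFirstM rest with
        | some j =>
          simp only [Option.map_some, Prod.mk.injEq, List.take_succ_cons,
            List.drop_succ_cons]
          refine ⟨by simp, trivial, ?_⟩
          rw [hb, pvPos_cons_ne x hne out0.length pos0 (rest.take j)]
        | none =>
          simp only [Option.map_none, Prod.mk.injEq]
          refine ⟨by simp, trivial, ?_⟩
          rw [hb, pvPos_cons_ne x hne out0.length pos0 rest]
      · rw [if_neg hne]
        rw [not_ne_iff] at hne
        subst hne
        rw [ih]
        simp only [pvFirstM, if_neg hx]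
        cases h : pvFirstM rest with
        | some j =>
          simp only [Option.map_some, Prod.mk.injEq, List.take_succ_cons,
            List.drop_succ_cons]
          refine ⟨by simp, trivial, ?_⟩
          rw [hb, pvPos_cons_empty out0.length pos0 (rest.take j)]
        | none =>
          simp only [Option.map_none, Prod.mk.injEq]
          refine ⟨by simp, trivial, ?_⟩
          rw [hb, pvPos_cons_empty out0.length pos0 rest]

-- first marker of a snoc
theorem pvFirstM_append_singleton (a : List String) (x : String) :
    pvFirstM (a ++ [x]) =
      match pvFirstM a with
      | some j => some j
      | none => if x = "<!-- image -->" then some a.length else none := by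
  induction a with
  | nil => simp [pvFirstM]
  | cons y t ih =>
    simp only [List.cons_append, pvFirstM, ih]
    by_cases hy : y = "<!-- image -->"
    · simp [hy]
    · cases h : pvFirstM t with
      | some j => simp [hy]
      | none =>
        by_cases hx : x = "<!-- image -->" <;> simp [hy, hx]

-- first marker of the reverse = last marker forward
theorem pvFirstM_reverse (l : List String) :
    pvFirstM l.reverse = (pvLastIdx l).map (fun k => l.length - 1 - k) := by
  induction l with
  | nil => simp [pvFirstM, pvLastIdx]
  | cons x t ih =>
    simp only [List.reverse_cons, pvFirstM_append_singleton, ih, pvLastIdx]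
    cases h : pvLastIdx t with
    | some k =>
      have := pvLastIdx_lt t k h
      simp only [Option.map_some, List.length_cons]
      congr 1
      omega
    | none =>
      by_cases hx : x = "<!-- image -->" <;>
        simp [hx, List.length_reverse]

-- last non-empty of a snoc
theorem pvLastNE_append_singleton (a : List String) (x : String) :
    pvLastNE (a ++ [x]) = if x ≠ "" then some a.length else pvLastNE a := by
  induction a with
  | nil =>
    by_cases hx : x = "" <;> simp [pvLastNE, hx]
  | cons y t ih =>
    simp only [List.cons_append, pvLastNE, ih]
    by_cases hx : x = ""
    · simp [hx]
    · cases h : pvLastNE t with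
      | some k => simp [hx]
      | none => by_cases hy : y = "" <;> simp [hx, hy]

theorem pvLastNE_reverse (l : List String) :
    pvLastNE l.reverse =
      (l.findIdx? (fun line => line ≠ "")).map (fun i => l.length - 1 - i) := by
  induction l with
  | nil => simp [pvLastNE]
  | cons x t ih =>
    simp only [List.reverse_cons, pvLastNE_append_singleton, ih, List.findIdx?_cons]
    by_cases hx : x = ""
    · rw [if_neg (by simp [hx]), if_neg (by simp [hx])]
      cases h : t.findIdx? (fun line => line ≠ "") with
      | none => simp
      | some i =>
        obtain ⟨hi, -⟩ := List.findIdx?_eq_some_iff_getElem.mp h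
        simp only [Option.map_some, List.length_cons]
        congr 1
        omega
    · rw [if_pos (by simp [hx]), if_pos (by simp [hx])]
      simp [List.length_reverse]

-- reversing the two halves of a splice of the reversed list
theorem pvRevSplice (l : List String) (m : Nat) (a b : String) :
    (l.reverse.take m ++ [a, b] ++ l.reverse.drop m).reverse =
      l.take (l.length - m) ++ [b, a] ++ l.drop (l.length - m) := by
  rw [List.take_reverse, List.drop_reverse]
  simp [List.reverse_append]

theorem insert_figure_spec_aux (lines : List String) (image caption : String) :
    insert_figure lines image caption = insert_figure_alt lines image caption := by
  unfold insert_figure insert_figure_alt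
  simp only [pvAFindImage_spec, pvAFindPara_spec, pvBLoop_spec, pvFirstM_reverse]
  cases hk : pvLastIdx lines with
  | some k =>
    -- marker present: both sides insert at the last marker index k
    have hklt := pvLastIdx_lt lines k hk
    simp only [Option.map_some, Option.getD_some]
    have h0k : ((0 : Int) + (k : Int)) = ((k : Nat) : Int) := by norm_num
    rw [h0k, pvInsert2 lines k (by omega)]
    have hm : lines.length - 1 - k + 1 = lines.length - k := by omega
    rw [if_pos trivial]
    simp only [List.nil_append]
    rw [hm, pvRevSplice lines (lines.length - k)
      ("\n![" ++ caption ++ "](" ++ image ++ ")\n") ""]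
    have hkk : lines.length - (lines.length - k) = k := by omega
    rw [hkk]
  | none =>
    -- no marker: both sides use the first-paragraph index (or the length)
    simp only [Option.map_none, Bool.false_eq_true, if_false, List.nil_append,
      List.length_nil]
    have hpos : pvPos 0 0 lines.reverse =
        match lines.findIdx? (fun line => line ≠ "") with
        | some i => lines.length - 1 - i
        | none => 0 := by
      simp only [pvPos, pvLastNE_reverse]
      cases h : lines.findIdx? (fun line => line ≠ "") <;> simp
    rw [hpos,
      pvRevSplice lines _ ("\n![" ++ caption ++ "](" ++ image ++ ")\n") ""]
    cases hf : lines.findIdx? (fun line => line ≠ "") with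
    | none =>
      simp only [Option.getD_none]
      rw [pvInsert2 lines lines.length (le_refl _)]
      simp
    | some i =>
      obtain ⟨hi, -⟩ := List.findIdx?_eq_some_iff_getElem.mp hf
      have hlp : lines.length - (lines.length - 1 - i) = i + 1 := by omega
      rw [hlp]
      by_cases hlt : i + 1 < lines.length
      · simp only [if_pos hlt, Option.getD_some]
        have hc : ((0 : Int) + (i : Int) + 1) = (((i + 1 : Nat)) : Int) := by push_cast; ring
        rw [hc, pvInsert2 lines (i + 1) (by omega)]
      · have hlen : i + 1 = lines.length := by omega
        simp only [if_neg hlt, Option.getD_none]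
        rw [pvInsert2 lines lines.length (le_refl _), ← hlen]

-- ===== VERDICT (by name: the statement is the Claim_ definition above) =====
theorem insert_figure_spec : Claim_equal_insert_figure := by
  intro lines image caption _
  unfold Spec_insert_figure
  exact insert_figure_spec_aux lines image caption
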